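-- pv_equiv track=rewrite | github.com/quadruplesec/University | FP/Practice Tests/ENP_M/exercise1.py | days_until_christmas
-- ===== SOURCE A (Python) =====
-- def days_until_christmas(date:tuple):
--     days_of_month = {
--     1: 31,
--     2: 28,
--     3: 31,
--     4: 30,
--     5: 31,
--     6: 30,
--     7: 31,
--     8: 31,
--     9: 30,
--     10: 31,
--     11: 30,
--     12: 31}
--     day, month, year = date
--
--     day_counter = 0
--
--     if month == 12:
--         if day <= 25:
--             return 25 - day
--         elif day > 25:
--             return day_counter + (31-day) + 359 #days from jan1 to dec25
--
--     if month < 12: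
--         while month != 12:
--             day_counter += days_of_month[month]
--             month += 1
--         if day < 25:
--             return day_counter + (25 - day)
--         else:
--             return day_counter - (day - 25)
-- ===== SOURCE B (Python) =====
-- _CUM = {1: 334, 2: 303, 3: 275, 4: 244, 5: 214, 6: 183,
--         7: 153, 8: 122, 9: 91, 10: 61, 11: 30}
--
-- def days_until_christmas(date: tuple):
--     day, month, year = date
--     if month == 12:
--         return 25 - day if day <= 25 else 390 - day
--     return _CUM[month] + 25 - day
-- ===== Notes on version B (the rewrite author's own statement) =====
-- stated objective: simpler
-- what changed: Replaced A's while-loop summation over the month dictionary with a constant precomputed cumulative remaining-days table and closed-form returns, merging A's two algebraically identical day<25/else branches.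
-- outside the precondition, e.g. on days_until_christmas((5, 13, 0)): A returns None, B raises KeyError
import Mathlib
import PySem

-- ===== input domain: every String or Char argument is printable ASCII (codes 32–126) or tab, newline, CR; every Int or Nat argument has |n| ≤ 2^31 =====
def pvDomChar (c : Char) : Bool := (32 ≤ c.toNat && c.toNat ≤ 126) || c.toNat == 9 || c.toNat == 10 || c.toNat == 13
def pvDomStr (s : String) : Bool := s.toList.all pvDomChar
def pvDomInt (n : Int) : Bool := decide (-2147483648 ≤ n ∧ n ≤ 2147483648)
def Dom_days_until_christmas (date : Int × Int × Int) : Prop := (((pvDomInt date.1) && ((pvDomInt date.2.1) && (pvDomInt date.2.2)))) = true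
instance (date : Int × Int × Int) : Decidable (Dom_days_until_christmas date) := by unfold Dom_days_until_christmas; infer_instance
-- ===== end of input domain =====

-- B replaces A's while-loop month summation by a constant cumulative table and closed forms (simpler).
-- Pre_ excludes month < 1 (A raises KeyError) and month > 12 (A falls through returning None, not an int).

-- ===== PORT A =====
def daysOfMonthA : PySem.Dict Int Int :=
  PySem.Dict.ofList [(1,31),(2,28),(3,31),(4,30),(5,31),(6,30),(7,31),(8,31),(9,30),(10,31),(11,30),(12,31)]

-- the while loop: fuel = number of iterations (12 - month); getD 0 is only reached outside Pre_
def loopA : Int → Int → Nat → Int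
  | _, acc, 0 => acc
  | m, acc, Nat.succ n => loopA (m + 1) (acc + PySem.Dict.getD daysOfMonthA m 0) n

def days_until_christmas (date : Int × Int × Int) : Int :=
  let day := date.1
  let month := date.2.1
  if month == 12 then
    if day ≤ 25 then 25 - day
    else 0 + (31 - day) + 359
  else if month < 12 then
    let day_counter := loopA month 0 (12 - month).toNat
    if day < 25 then day_counter + (25 - day)
    else day_counter - (day - 25)
  else 0  -- Python A returns None here; excluded by Pre_

-- ===== PORT B =====
def cumB : PySem.Dict Int Int :=
  PySem.Dict.ofList [(1,334),(2,303),(3,275),(4,244),(5,214),(6,183),(7,153),(8,122),(9,91),(10,61),(11,30)]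

def days_until_christmas_alt (date : Int × Int × Int) : Int :=
  let day := date.1
  let month := date.2.1
  if month == 12 then
    if day ≤ 25 then 25 - day else 390 - day
  else PySem.Dict.getD cumB month 0 + 25 - day  -- KeyError (none) only outside Pre_; getD 0 unreachable under Pre_

-- ===== PRECONDITION & SPEC =====
-- Pre_ excludes month < 1 (A raises KeyError in the loop) and month > 12 (A returns None, not an int).
def Pre_days_until_christmas (date : Int × Int × Int) : Prop := 1 ≤ date.2.1 ∧ date.2.1 ≤ 12
instance (date : Int × Int × Int) : Decidable (Pre_days_until_christmas date) := by unfold Pre_days_until_christmas; infer_instance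
def pvWitness_days_until_christmas : (Int × Int × Int) := (7, 3, 2024)

def Spec_days_until_christmas (date : Int × Int × Int) (out : Int) : Prop := out = days_until_christmas_alt date
instance (date : Int × Int × Int) (out : Int) : Decidable (Spec_days_until_christmas date out) := by unfold Spec_days_until_christmas; infer_instance

-- ===== CLAIM (what is proved, stated in full; the proofs are below) =====
def Claim_equal_days_until_christmas : Prop := ∀ (date : Int × Int × Int), Dom_days_until_christmas date → Pre_days_until_christmas date → Spec_days_until_christmas date (days_until_christmas date)

-- ===== LEMMAS AND PROOFS =====
theorem loopA_1 : loopA 1 0 (Int.toNat 11) = 334 := by decide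
theorem loopA_2 : loopA 2 0 (Int.toNat 10) = 303 := by decide
theorem loopA_3 : loopA 3 0 (Int.toNat 9) = 275 := by decide
theorem loopA_4 : loopA 4 0 (Int.toNat 8) = 244 := by decide
theorem loopA_5 : loopA 5 0 (Int.toNat 7) = 214 := by decide
theorem loopA_6 : loopA 6 0 (Int.toNat 6) = 183 := by decide
theorem loopA_7 : loopA 7 0 (Int.toNat 5) = 153 := by decide
theorem loopA_8 : loopA 8 0 (Int.toNat 4) = 122 := by decide
theorem loopA_9 : loopA 9 0 (Int.toNat 3) = 91 := by decide
theorem loopA_10 : loopA 10 0 (Int.toNat 2) = 61 := by decide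
theorem loopA_11 : loopA 11 0 (Int.toNat 1) = 30 := by decide

theorem getA_1 : PySem.Dict.getD daysOfMonthA 1 0 = 31 := by decide
theorem getA_2 : PySem.Dict.getD daysOfMonthA 2 0 = 28 := by decide
theorem getA_3 : PySem.Dict.getD daysOfMonthA 3 0 = 31 := by decide
theorem getA_4 : PySem.Dict.getD daysOfMonthA 4 0 = 30 := by decide
theorem getA_5 : PySem.Dict.getD daysOfMonthA 5 0 = 31 := by decide
theorem getA_6 : PySem.Dict.getD daysOfMonthA 6 0 = 30 := by decide
theorem getA_7 : PySem.Dict.getD daysOfMonthA 7 0 = 31 := by decide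
theorem getA_8 : PySem.Dict.getD daysOfMonthA 8 0 = 31 := by decide
theorem getA_9 : PySem.Dict.getD daysOfMonthA 9 0 = 30 := by decide
theorem getA_10 : PySem.Dict.getD daysOfMonthA 10 0 = 31 := by decide
theorem getA_11 : PySem.Dict.getD daysOfMonthA 11 0 = 30 := by decide
theorem getA_12 : PySem.Dict.getD daysOfMonthA 12 0 = 31 := by decide
theorem getB_1 : PySem.Dict.getD cumB 1 0 = 334 := by decide
theorem getB_2 : PySem.Dict.getD cumB 2 0 = 303 := by decide
theorem getB_3 : PySem.Dict.getD cumB 3 0 = 275 := by decide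
theorem getB_4 : PySem.Dict.getD cumB 4 0 = 244 := by decide
theorem getB_5 : PySem.Dict.getD cumB 5 0 = 214 := by decide
theorem getB_6 : PySem.Dict.getD cumB 6 0 = 183 := by decide
theorem getB_7 : PySem.Dict.getD cumB 7 0 = 153 := by decide
theorem getB_8 : PySem.Dict.getD cumB 8 0 = 122 := by decide
theorem getB_9 : PySem.Dict.getD cumB 9 0 = 91 := by decide
theorem getB_10 : PySem.Dict.getD cumB 10 0 = 61 := by decide
theorem getB_11 : PySem.Dict.getD cumB 11 0 = 30 := by decide


-- ===== VERDICT (by name: the statement is the Claim_ definition above) =====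
theorem days_until_christmas_spec : Claim_equal_days_until_christmas := by
  intro ⟨day, month, year⟩ _ hpre
  obtain ⟨h1, h2⟩ := hpre
  simp only at h1 h2
  unfold Spec_days_until_christmas days_until_christmas days_until_christmas_alt
  interval_cases month <;>
    norm_num [loopA_1, loopA_2, loopA_3, loopA_4, loopA_5, loopA_6, loopA_7, loopA_8, loopA_9, loopA_10, loopA_11, loopA, getA_1, getA_2, getA_3, getA_4, getA_5, getA_6, getA_7, getA_8, getA_9, getA_10, getA_11, getA_12, getB_1, getB_2, getB_3, getB_4, getB_5, getB_6, getB_7, getB_8, getB_9, getB_10, getB_11] <;> omega
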